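-- pv_equiv track=rewrite | github.com/betagouv/diagbruit.beta.gouv.fr | fastapi/app/algorithm/score.py | get_filtered_land_intersections
-- ===== SOURCE A (Python) =====
-- def get_filtered_land_intersections(noisemap_intersections):
--     """
--     Get all the filtered arrays needed to calculate score in modules.
--     """
--     def filter_items(indicetype, typeterr):
--         return [
--             item for item in noisemap_intersections
--             if item.get('typesource') in ['F', 'R']
--             and item.get('indicetype') == indicetype
--             and item.get('typeterr') == typeterr
--         ]
--
--     land_intersections_agglo_ld = filter_items('LD', 'AGGLO')
--     land_intersections_infra_ld = filter_items('LD', 'INFRA')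
--     land_intersections_agglo_ln = filter_items('LN', 'AGGLO')
--     land_intersections_infra_ln = filter_items('LN', 'INFRA')
--
--     return (
--         land_intersections_agglo_ld,
--         land_intersections_agglo_ln,
--         land_intersections_infra_ld,
--         land_intersections_infra_ln
--     )
-- ===== SOURCE B (Python) =====
-- def get_filtered_land_intersections(noisemap_intersections):
--     """
--     Get all the filtered arrays needed to calculate score in modules.
--     Single pass: dispatch each item to its bucket instead of four separate scans.
--     """
--     agglo_ld, agglo_ln, infra_ld, infra_ln = [], [], [], []
--     for item in noisemap_intersections:
--         if item.get('typesource') in ('F', 'R'):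
--             key = (item.get('indicetype'), item.get('typeterr'))
--             if key == ('LD', 'AGGLO'):
--                 agglo_ld.append(item)
--             elif key == ('LD', 'INFRA'):
--                 infra_ld.append(item)
--             elif key == ('LN', 'AGGLO'):
--                 agglo_ln.append(item)
--             elif key == ('LN', 'INFRA'):
--                 infra_ln.append(item)
--     return (agglo_ld, agglo_ln, infra_ld, infra_ln)
-- ===== Notes on version B (the rewrite author's own statement) =====
-- stated objective: alternative
-- what changed: Replaces four separate list-comprehension scans of the input with one loop that dispatches each qualifying item to the matching bucket by its (indicetype, typeterr) key.
import Mathlib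
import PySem

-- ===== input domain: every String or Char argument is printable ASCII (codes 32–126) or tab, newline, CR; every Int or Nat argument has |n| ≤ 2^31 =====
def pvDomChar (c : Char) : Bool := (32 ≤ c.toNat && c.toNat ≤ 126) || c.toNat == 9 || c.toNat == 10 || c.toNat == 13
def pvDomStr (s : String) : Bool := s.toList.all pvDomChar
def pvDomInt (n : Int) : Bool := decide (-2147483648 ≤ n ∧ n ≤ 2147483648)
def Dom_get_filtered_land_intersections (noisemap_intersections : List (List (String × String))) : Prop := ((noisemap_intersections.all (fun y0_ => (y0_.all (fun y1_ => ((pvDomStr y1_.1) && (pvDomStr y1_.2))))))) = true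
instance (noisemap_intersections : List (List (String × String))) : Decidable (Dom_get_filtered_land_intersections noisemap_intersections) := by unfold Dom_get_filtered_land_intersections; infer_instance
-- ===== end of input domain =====

-- B makes one pass dispatching items to four buckets instead of A's four scans (objective: alternative decomposition).

-- ===== PORT A =====
-- item.get(k): first-match lookup in the association list (exact for a Python dict, which has unique keys)
def pvGetKey (item : List (String × String)) (k : String) : Option String :=
  (item.find? (fun p => p.1 == k)).map (·.2)

-- the inner helper filter_items of A
def pvFilterItems (noisemap_intersections : List (List (String × String)))
    (indicetype typeterr : String) : List (List (String × String)) :=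
  noisemap_intersections.filter (fun item =>
    (pvGetKey item "typesource" == some "F" || pvGetKey item "typesource" == some "R")
    && pvGetKey item "indicetype" == some indicetype
    && pvGetKey item "typeterr" == some typeterr)

def get_filtered_land_intersections (noisemap_intersections : List (List (String × String))) : (List (List (String × String))) × (List (List (String × String))) × (List (List (String × String))) × (List (List (String × String))) :=
  let land_intersections_agglo_ld := pvFilterItems noisemap_intersections "LD" "AGGLO"
  let land_intersections_infra_ld := pvFilterItems noisemap_intersections "LD" "INFRA"
  let land_intersections_agglo_ln := pvFilterItems noisemap_intersections "LN" "AGGLO"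
  let land_intersections_infra_ln := pvFilterItems noisemap_intersections "LN" "INFRA"
  (land_intersections_agglo_ld, land_intersections_agglo_ln,
   land_intersections_infra_ld, land_intersections_infra_ln)

-- ===== PORT B =====
-- loop body of Source B: test typesource, then dispatch on the (indicetype, typeterr) key
def pvDispatch
    (acc : (List (List (String × String))) × (List (List (String × String))) × (List (List (String × String))) × (List (List (String × String))))
    (item : List (String × String)) :
    (List (List (String × String))) × (List (List (String × String))) × (List (List (String × String))) × (List (List (String × String))) :=
  if pvGetKey item "typesource" == some "F" || pvGetKey item "typesource" == some "R" then
    if (pvGetKey item "indicetype", pvGetKey item "typeterr") == (some "LD", some "AGGLO") then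
      (acc.1 ++ [item], acc.2.1, acc.2.2.1, acc.2.2.2)
    else if (pvGetKey item "indicetype", pvGetKey item "typeterr") == (some "LD", some "INFRA") then
      (acc.1, acc.2.1, acc.2.2.1 ++ [item], acc.2.2.2)
    else if (pvGetKey item "indicetype", pvGetKey item "typeterr") == (some "LN", some "AGGLO") then
      (acc.1, acc.2.1 ++ [item], acc.2.2.1, acc.2.2.2)
    else if (pvGetKey item "indicetype", pvGetKey item "typeterr") == (some "LN", some "INFRA") then
      (acc.1, acc.2.1, acc.2.2.1, acc.2.2.2 ++ [item])
    else acc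
  else acc

def get_filtered_land_intersections_alt (noisemap_intersections : List (List (String × String))) : (List (List (String × String))) × (List (List (String × String))) × (List (List (String × String))) × (List (List (String × String))) :=
  noisemap_intersections.foldl pvDispatch ([], [], [], [])

-- ===== PRECONDITION & SPEC =====
def Spec_get_filtered_land_intersections (noisemap_intersections : List (List (String × String))) (out : (List (List (String × String))) × (List (List (String × String))) × (List (List (String × String))) × (List (List (String × String)))) : Prop := out = get_filtered_land_intersections_alt noisemap_intersections
instance (noisemap_intersections : List (List (String × String))) (out : (List (List (String × String))) × (List (List (String × String))) × (List (List (String × String))) × (List (List (String × String)))) : Decidable (Spec_get_filtered_land_intersections noisemap_intersections out) := by unfold Spec_get_filtered_land_intersections; infer_instance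

-- ===== CLAIM (what is proved, stated in full; the proofs are below) =====
def Claim_equal_get_filtered_land_intersections : Prop := ∀ (noisemap_intersections : List (List (String × String))), Dom_get_filtered_land_intersections noisemap_intersections → Spec_get_filtered_land_intersections noisemap_intersections (get_filtered_land_intersections noisemap_intersections)

-- ===== LEMMAS AND PROOFS =====

-- filter over a cons, with A's predicate for the (indicetype, typeterr) pair
theorem pvFilterItems_cons (x : List (String × String)) (xs : List (List (String × String)))
    (i t : String) :
    pvFilterItems (x :: xs) i t =
      if ((pvGetKey x "typesource" == some "F" || pvGetKey x "typesource" == some "R")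
          && pvGetKey x "indicetype" == some i
          && pvGetKey x "typeterr" == some t) = true
      then x :: pvFilterItems xs i t else pvFilterItems xs i t := by
  simp [pvFilterItems, List.filter_cons]

-- loop invariant: folding B's dispatch from any accumulator appends exactly A's four filters
theorem pvDispatch_foldl (xs : List (List (String × String)))
    (a b c d : List (List (String × String))) :
    xs.foldl pvDispatch (a, b, c, d) =
      (a ++ pvFilterItems xs "LD" "AGGLO",
       b ++ pvFilterItems xs "LN" "AGGLO",
       c ++ pvFilterItems xs "LD" "INFRA",
       d ++ pvFilterItems xs "LN" "INFRA") := by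
  induction xs generalizing a b c d with
  | nil => simp [pvFilterItems]
  | cons x xs ih =>
    rw [List.foldl_cons]
    by_cases hts : (pvGetKey x "typesource" == some "F" || pvGetKey x "typesource" == some "R") = true
    · by_cases h1 : pvGetKey x "indicetype" = some "LD" ∧ pvGetKey x "typeterr" = some "AGGLO"
      · obtain ⟨e1, e2⟩ := h1
        simp [pvDispatch, hts, e1, e2, ih, pvFilterItems_cons]
      · by_cases h2 : pvGetKey x "indicetype" = some "LD" ∧ pvGetKey x "typeterr" = some "INFRA"
        · obtain ⟨e1, e2⟩ := h2
          simp [pvDispatch, hts, e1, e2, ih, pvFilterItems_cons]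
        · by_cases h3 : pvGetKey x "indicetype" = some "LN" ∧ pvGetKey x "typeterr" = some "AGGLO"
          · obtain ⟨e1, e2⟩ := h3
            simp [pvDispatch, hts, e1, e2, ih, pvFilterItems_cons]
          · by_cases h4 : pvGetKey x "indicetype" = some "LN" ∧ pvGetKey x "typeterr" = some "INFRA"
            · obtain ⟨e1, e2⟩ := h4
              simp [pvDispatch, hts, e1, e2, ih, pvFilterItems_cons]
            · simp [pvDispatch, hts, ih, pvFilterItems_cons, beq_iff_eq,
                Bool.and_eq_true, h1, h2, h3, h4]
    · rw [Bool.not_eq_true] at hts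
      simp [pvDispatch, hts, ih, pvFilterItems_cons]

theorem get_filtered_land_intersections_spec : Claim_equal_get_filtered_land_intersections := by
  intro xs _
  show _ = _
  unfold get_filtered_land_intersections get_filtered_land_intersections_alt
  rw [pvDispatch_foldl]
  simp
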